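-- pv_equiv track=rewrite | github.com/Olezzhha/LAba2_AiSD | compressor.py | encode_value_with_inversion
-- ===== SOURCE A (Python) =====
-- def encode_value_with_inversion(value, category):
--     if category == 0:
--         return ''
--     abs_val = abs(int(value))
--     bin_str = format(abs_val, f'0{category}b')
--     if value >= 0:
--         return bin_str
--     inverted = ''.join('1' if b == '0' else '0' for b in bin_str)
--     return inverted
-- ===== SOURCE B (Python) =====
-- def encode_value_with_inversion(value, category):
--     if category == 0:
--         return ''
--     a = abs(int(value))
--     L = max(category, a.bit_length() or 1)
--     if value >= 0:
--         return format(a, f'0{L}b')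
--     return format((1 << L) - 1 - a, f'0{L}b')
-- ===== Notes on version B (the rewrite author's own statement) =====
-- stated objective: alternative
-- what changed: The per-character bit-flip comprehension over the formatted string is replaced by an arithmetic one's-complement (1<<L)-1-abs_val formatted once at the output width L = max(category, bit_length); Pre_ excludes category < 0, where the format specifier is invalid and A raises ValueError.
-- outside the precondition, e.g. on encode_value_with_inversion(5, -1): A raises ValueError, B returns '101'
import Mathlib
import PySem

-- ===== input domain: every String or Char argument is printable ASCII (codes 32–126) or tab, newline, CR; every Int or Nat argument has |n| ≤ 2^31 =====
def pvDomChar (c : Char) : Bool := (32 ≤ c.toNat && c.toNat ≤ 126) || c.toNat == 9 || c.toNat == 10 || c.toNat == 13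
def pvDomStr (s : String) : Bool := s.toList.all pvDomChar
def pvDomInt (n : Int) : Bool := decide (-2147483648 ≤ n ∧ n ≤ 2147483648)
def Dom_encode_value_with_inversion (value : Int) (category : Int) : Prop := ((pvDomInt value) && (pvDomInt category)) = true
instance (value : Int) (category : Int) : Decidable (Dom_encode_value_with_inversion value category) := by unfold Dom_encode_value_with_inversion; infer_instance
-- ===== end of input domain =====

-- B replaces A's per-character bit-flip of the formatted string by an arithmetic one's-complement formatted once (alternative).

-- ===== PORT A =====
-- binary digits of n, most significant first ([] for n = 0); shared helper for Python's format(n, f'0{w}b')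
def binDigits (n : Nat) : List Char :=
  if h : n = 0 then [] else
    binDigits (n / 2) ++ [if n % 2 = 1 then '1' else '0']
decreasing_by exact Nat.div_lt_self (Nat.pos_of_ne_zero h) (by omega)

-- format(n, f'0{w}b'): binary digits of n ('0' for 0) left-padded with '0' to width w
def pyBinFormat (w : Nat) (n : Nat) : List Char :=
  let ds := if n = 0 then ['0'] else binDigits n
  List.replicate (w - ds.length) '0' ++ ds

def encode_value_with_inversion (value : Int) (category : Int) : String :=
  if category == 0 then "" else
    let abs_val := value.natAbs
    let bin_str := pyBinFormat category.toNat abs_val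
    if value ≥ 0 then String.mk bin_str
    else String.mk (bin_str.map (fun b => if b = '0' then '1' else '0'))

-- ===== PORT B =====
def encode_value_with_inversion_alt (value : Int) (category : Int) : String :=
  if category == 0 then "" else
    let a := value.natAbs
    let bl := PySem.Int.bitLength (a : Int)
    let L := max category.toNat (if bl = 0 then 1 else bl)   -- a.bit_length() or 1
    if value ≥ 0 then String.mk (pyBinFormat L a)
    else String.mk (pyBinFormat L (2 ^ L - 1 - a))

-- ===== PRECONDITION & SPEC =====
-- Pre_ excludes exactly category < 0, on which Python's format specifier f'0{category}b' is invalid and A raises ValueError.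
def Pre_encode_value_with_inversion (value : Int) (category : Int) : Prop := 0 ≤ category
instance (value : Int) (category : Int) : Decidable (Pre_encode_value_with_inversion value category) := by unfold Pre_encode_value_with_inversion; infer_instance
def pvWitness_encode_value_with_inversion : Int × Int := (-5, 4)

def Spec_encode_value_with_inversion (value : Int) (category : Int) (out : String) : Prop := out = encode_value_with_inversion_alt value category
instance (value : Int) (category : Int) (out : String) : Decidable (Spec_encode_value_with_inversion value category out) := by unfold Spec_encode_value_with_inversion; infer_instance

-- ===== CLAIM (what is proved, stated in full; the proofs are below) =====
def Claim_equal_encode_value_with_inversion : Prop := ∀ (value : Int) (category : Int), Dom_encode_value_with_inversion value category → Pre_encode_value_with_inversion value category → Spec_encode_value_with_inversion value category (encode_value_with_inversion value category)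
-- ===== LEMMAS AND PROOFS =====

-- binPad L a: the L low-order binary digits of a, most significant first (proof-side normal form)
def binPad : Nat → Nat → List Char
  | 0, _ => []
  | L+1, a => binPad L (a / 2) ++ [if a % 2 = 1 then '1' else '0']

lemma binPad_zero (L : Nat) : binPad L 0 = List.replicate L '0' := by
  induction L with
  | zero => rfl
  | succ L ih => simp [binPad, ih, List.replicate_succ' (n := L)]

lemma binDigits_length (n : Nat) : (binDigits n).length = PySem.Int.bitLength (n : Int) := by
  induction n using Nat.strong_induction_on with
  | _ n ih =>
    by_cases h : n = 0
    · subst h; simp [binDigits]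
    · rw [binDigits]
      simp only [h, dif_neg, not_false_iff, List.length_append, List.length_cons, List.length_nil]
      rw [ih (n / 2) (Nat.div_lt_self (Nat.pos_of_ne_zero h) (by omega)),
        PySem.Int.bitLength_natCast (Nat.pos_of_ne_zero h)]

lemma lt_two_pow_ds_length (n : Nat) :
    n < 2 ^ ((if n = 0 then ['0'] else binDigits n).length) := by
  by_cases h : n = 0
  · simp [h]
  · simp only [h, if_neg, ite_false, binDigits_length]
    have := PySem.Int.lt_two_pow_bitLength (n : Int)
    simpa using this

lemma ds_length_pos (n : Nat) : 1 ≤ (if n = 0 then ['0'] else binDigits n).length := by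
  by_cases h : n = 0
  · simp [h]
  · rw [binDigits]; simp [h]

-- widening the format width to the actual output length changes nothing
lemma pyBinFormat_width (w a : Nat) :
    pyBinFormat w a
      = pyBinFormat (max w ((if a = 0 then ['0'] else binDigits a).length)) a := by
  simp only [pyBinFormat]
  congr 2
  omega

lemma pyBinFormat_eq_binPad (L a : Nat) (ha : a < 2 ^ L) (hL : 1 ≤ L) :
    pyBinFormat L a = binPad L a := by
  induction L generalizing a with
  | zero => omega
  | succ L ih =>
    by_cases h0 : a = 0
    · subst h0
      simp [pyBinFormat, binPad, binPad_zero, List.replicate_succ' (n := L)]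
    · by_cases h1 : a = 1
      · subst h1
        simp [pyBinFormat, binPad, binDigits, binPad_zero, List.replicate_succ' (n := L)]
      · have h2 : 2 ≤ a := by omega
        have hL1 : 1 ≤ L := by
          by_contra hc
          have : L = 0 := by omega
          subst this
          simp at ha
          omega
        have hdvd : a / 2 ≠ 0 := by omega
        have hlt : a / 2 < 2 ^ L := by
          rw [pow_succ] at ha; omega
        have ihh := ih (a / 2) hlt hL1
        rw [binPad, ← ihh]
        simp only [pyBinFormat, h0, ite_false, hdvd]
        have hda : binDigits a = binDigits (a / 2) ++ [if a % 2 = 1 then '1' else '0'] := by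
          rw [binDigits]; simp [h0]
        rw [hda]
        rw [← List.append_assoc]
        congr 2
        simp [List.length_append]

lemma flip_binPad (L a : Nat) (ha : a < 2 ^ L) :
    (binPad L a).map (fun b => if b = '0' then '1' else '0') = binPad L (2 ^ L - 1 - a) := by
  induction L generalizing a with
  | zero => rfl
  | succ L ih =>
    have hk : a / 2 < 2 ^ L := by rw [pow_succ] at ha; omega
    rw [binPad, binPad, List.map_append, ih _ hk]
    have e1 : (2 ^ (L + 1) - 1 - a) / 2 = 2 ^ L - 1 - a / 2 := by
      rw [pow_succ] at ha ⊢; omega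
    have e2 : (2 ^ (L + 1) - 1 - a) % 2 = 1 - a % 2 := by
      rw [pow_succ] at ha ⊢; omega
    rw [e1]
    congr 1
    rcases Nat.mod_two_eq_zero_or_one a with h | h <;> simp [h, e2]

-- ===== VERDICT (by name: the statement is the Claim_ definition above) =====
theorem encode_value_with_inversion_spec : Claim_equal_encode_value_with_inversion := by
  intro value category hdom hpre
  unfold Spec_encode_value_with_inversion encode_value_with_inversion encode_value_with_inversion_alt
  by_cases hc : category = 0
  · simp [hc]
  · simp only [hc, beq_iff_eq, if_false, ite_false]
    set a := value.natAbs with ha_def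
    set dsl := (if a = 0 then ['0'] else binDigits a).length with hdsl_def
    have hbl : (if PySem.Int.bitLength (a : Int) = 0 then 1 else PySem.Int.bitLength (a : Int)) = dsl := by
      by_cases h0 : a = 0
      · simp [h0, hdsl_def]
      · have hne : (binDigits a).length ≠ 0 := by
          rw [binDigits]; simp [h0]
        rw [hdsl_def]
        simp [h0, ← binDigits_length, hne]
    rw [hbl]
    set L := max category.toNat dsl with hL_def
    have haL : a < 2 ^ L := by
      have h1 := lt_two_pow_ds_length a
      have h2 : (2 : Nat) ^ dsl ≤ 2 ^ L := Nat.pow_le_pow_right (by omega) (by omega)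
      rw [← hdsl_def] at h1
      omega
    have hL1 : 1 ≤ L := le_trans (ds_length_pos a) (le_max_right _ _)
    have hfmt : pyBinFormat category.toNat a = binPad L a := by
      rw [pyBinFormat_width, ← hdsl_def, ← hL_def]
      exact pyBinFormat_eq_binPad L a haL hL1
    by_cases hv : value ≥ 0
    · simp only [hv, if_true, ite_true]
      rw [hfmt, pyBinFormat_eq_binPad L a haL hL1]
    · simp only [hv, if_false, ite_false]
      rw [hfmt, flip_binPad L a haL]
      have hc2 : 2 ^ L - 1 - a < 2 ^ L := by
        have : 1 ≤ 2 ^ L := Nat.one_le_two_pow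
        omega
      rw [pyBinFormat_eq_binPad L _ hc2 hL1]
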